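-- pv_equiv track=rewrite | github.com/charlie9578/adventofcode2022 | Day8.py | determine_line_visibility
-- ===== SOURCE A (Python) =====
-- def determine_line_visibility(line):
--     max_value = -1
--     line_visiblity = []
--     for value in line:
--         if value <= max_value:
--             line_visiblity.append(0)
--         else:
--             max_value = value
--             line_visiblity.append(1)
--     return line_visiblity
-- ===== SOURCE B (Python) =====
-- def determine_line_visibility(line):
--     prefix = [-1]
--     for v in line:
--         prefix.append(max(prefix[-1], v))
--     return [1 if v > m else 0 for v, m in zip(line, prefix)]
-- ===== Notes on version B (the rewrite author's own statement) =====
-- stated objective: alternative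
-- what changed: Replaces the single branch-and-accumulate loop with a two-pass decomposition: first build a prefix-maximum table (seeded with -1), then produce the output by zipping the line with that table in one comprehension.
import Mathlib
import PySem

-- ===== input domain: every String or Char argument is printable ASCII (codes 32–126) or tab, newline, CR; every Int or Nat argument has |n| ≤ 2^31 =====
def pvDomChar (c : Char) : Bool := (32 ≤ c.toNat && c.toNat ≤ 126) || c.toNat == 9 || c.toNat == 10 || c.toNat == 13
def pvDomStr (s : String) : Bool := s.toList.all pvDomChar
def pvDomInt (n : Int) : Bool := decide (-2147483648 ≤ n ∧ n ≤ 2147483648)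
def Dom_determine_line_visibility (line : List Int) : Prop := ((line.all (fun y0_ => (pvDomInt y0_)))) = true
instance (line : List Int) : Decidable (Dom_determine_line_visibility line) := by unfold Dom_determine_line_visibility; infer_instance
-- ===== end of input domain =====

-- B builds a prefix-maximum table first and then zips with it, instead of A's single branch-and-accumulate loop (objective: alternative decomposition, same cost).

-- ===== PORT A =====
-- single fold carrying (max_value, line_visiblity)
def determine_line_visibility (line : List Int) : List Int :=
  (line.foldl (fun (s : Int × List Int) value =>
      if value ≤ s.1 then (s.1, s.2 ++ [0]) else (value, s.2 ++ [1]))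
    (-1, [])).2

-- ===== PORT B =====
-- prefix-maximum table: element i is the max of -1 and line[0..i)
def pvPrefixMaxes (m : Int) : List Int → List Int
  | [] => []
  | v :: vs => m :: pvPrefixMaxes (max m v) vs

def determine_line_visibility_alt (line : List Int) : List Int :=
  List.zipWith (fun v m => if v > m then (1 : Int) else 0) line (pvPrefixMaxes (-1) line)

-- ===== PRECONDITION & SPEC =====
def Spec_determine_line_visibility (line : List Int) (out : List Int) : Prop := out = determine_line_visibility_alt line
instance (line : List Int) (out : List Int) : Decidable (Spec_determine_line_visibility line out) := by unfold Spec_determine_line_visibility; infer_instance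

-- ===== CLAIM (what is proved, stated in full; the proofs are below) =====
def Claim_equal_determine_line_visibility : Prop := ∀ (line : List Int), Dom_determine_line_visibility line → Spec_determine_line_visibility line (determine_line_visibility line)

-- ===== LEMMAS AND PROOFS =====
theorem dlv_fold_eq (line : List Int) : ∀ (m : Int) (acc : List Int),
    (line.foldl (fun (s : Int × List Int) value =>
        if value ≤ s.1 then (s.1, s.2 ++ [0]) else (value, s.2 ++ [1]))
      (m, acc)).2
    = acc ++ List.zipWith (fun v p => if v > p then (1 : Int) else 0) line (pvPrefixMaxes m line) := by
  induction line with
  | nil => intro m acc; simp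
  | cons v vs ih =>
    intro m acc
    simp only [List.foldl_cons, pvPrefixMaxes, List.zipWith_cons_cons]
    by_cases h : v ≤ m
    · have hmax : max m v = m := by omega
      simp [h, hmax, ih, show ¬ v > m by omega]
    · have hmax : max m v = v := by omega
      simp [h, hmax, ih, show v > m by omega]

-- ===== VERDICT (by name: the statement is the Claim_ definition above) =====
theorem determine_line_visibility_spec : Claim_equal_determine_line_visibility := by
  intro line _
  unfold Spec_determine_line_visibility determine_line_visibility determine_line_visibility_alt
  simpa using dlv_fold_eq line (-1) []
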